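-- pv_equiv track=rewrite | github.com/jasontan656/Otctopus_OS_AgentConsole | Skills/_shared/octopus_os_workflow_runtime/scripts/construction_plan_support.py | _anchor_graph
-- ===== SOURCE A (Python) =====
-- def _anchor_graph(records: dict[str, dict[str, object]]) -> dict[str, set[str]]:
--     graph = {doc_ref: set() for doc_ref in records}
--     for doc_ref, record in records.items():
--         for target in record["anchors"]:
--             if target not in records:
--                 continue
--             graph[doc_ref].add(target)
--             graph[target].add(doc_ref)
--     return graph
-- ===== SOURCE B (Python) =====
-- def _anchor_graph(records: dict[str, dict[str, object]]) -> dict[str, set[str]]: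
--     def neighbours(d):
--         cand = []
--         for o, rec in records.items():
--             if o == d:
--                 cand.extend(t for t in rec["anchors"] if t in records)
--             elif d in rec["anchors"]:
--                 cand.append(o)
--         return set(cand)
--     return {d: neighbours(d) for d in records}
-- ===== Notes on version B (the rewrite author's own statement) =====
-- stated objective: alternative
-- what changed: B computes each node's neighbour set independently (its own valid outgoing anchors plus a full scan for records that reference it) instead of A's single edge pass that mutates both endpoints of every edge.
import Mathlib
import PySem

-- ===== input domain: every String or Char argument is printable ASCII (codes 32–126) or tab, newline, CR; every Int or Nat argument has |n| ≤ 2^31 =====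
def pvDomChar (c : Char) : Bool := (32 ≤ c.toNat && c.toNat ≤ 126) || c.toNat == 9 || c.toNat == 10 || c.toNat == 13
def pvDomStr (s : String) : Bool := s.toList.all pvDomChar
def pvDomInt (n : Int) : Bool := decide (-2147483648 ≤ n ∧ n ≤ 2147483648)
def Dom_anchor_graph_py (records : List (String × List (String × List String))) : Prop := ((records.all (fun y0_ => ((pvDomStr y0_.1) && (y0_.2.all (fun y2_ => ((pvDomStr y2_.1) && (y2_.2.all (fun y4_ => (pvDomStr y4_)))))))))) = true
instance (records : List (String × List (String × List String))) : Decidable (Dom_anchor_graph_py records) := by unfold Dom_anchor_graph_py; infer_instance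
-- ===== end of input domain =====

-- B computes each node's neighbour set independently (own valid outgoing anchors plus a scan
-- for incoming references) instead of A's single edge pass mutating both endpoints; objective:
-- alternative decomposition, same exact result.

-- ===== PORT A =====
-- literal transliteration of A: a dict of empty sets over the keys, then one pass adding each
-- valid edge to both endpoints' sets.  record["anchors"] is ported as getD (Pre_ guarantees the
-- key is present; on a missing key Python raises KeyError and the input is outside Pre_).
def anchor_graph_py (records : List (String × List (String × List String))) : List (String × List String) :=
  let rd : PySem.Dict String (List (String × List String)) := PySem.Dict.ofList records
  let graph0 : PySem.Dict String (PySem.Set String) :=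
    rd.keys.foldl (fun g k => g.insert k PySem.Set.empty) PySem.Dict.empty
  let graph :=
    rd.items.foldl (fun g p =>
      ((PySem.Dict.ofList p.2).getD "anchors" []).foldl (fun g t =>
        if rd.contains t then
          (g.modify p.1 PySem.Set.empty (fun s => PySem.Set.add s t)).modify t
            PySem.Set.empty (fun s => PySem.Set.add s p.1)
        else g) g) graph0
  graph.items

-- ===== PORT B =====
-- B's neighbours(d): one scan of the records collecting d's own valid anchors (when o = d)
-- and every o that references d, then set() of the collected list.
def altNeighbours (rd : PySem.Dict String (List (String × List String))) (d : String) : PySem.Set String :=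
  PySem.Set.ofList (rd.items.foldl (fun cand p =>
    let anchors := (PySem.Dict.ofList p.2).getD "anchors" []
    if p.1 == d then cand ++ anchors.filter (fun t => rd.contains t)
    else if anchors.contains d then cand ++ [p.1]
    else cand) [])

def anchor_graph_py_alt (records : List (String × List (String × List String))) : List (String × List String) :=
  let rd : PySem.Dict String (List (String × List String)) := PySem.Dict.ofList records
  rd.keys.map (fun d => (d, altNeighbours rd d))

-- ===== PRECONDITION & SPEC =====
-- Pre_ excludes exactly the inputs where Python raises KeyError: some record (surviving dict
-- key collapsing) has no "anchors" key.
def Pre_anchor_graph_py (records : List (String × List (String × List String))) : Prop :=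
  ∀ p ∈ (PySem.Dict.ofList records).items, "anchors" ∈ p.2.map (fun q => q.1)
instance (records : List (String × List (String × List String))) : Decidable (Pre_anchor_graph_py records) := by unfold Pre_anchor_graph_py; infer_instance

def pvWitness_anchor_graph_py : (List (String × List (String × List String))) :=
  [("a", [("anchors", ["a", "b", "x"])]), ("b", [("anchors", [])])]

def Spec_anchor_graph_py (records : List (String × List (String × List String))) (out : List (String × List String)) : Prop := out = anchor_graph_py_alt records
instance (records : List (String × List (String × List String))) (out : List (String × List String)) : Decidable (Spec_anchor_graph_py records out) := by unfold Spec_anchor_graph_py; infer_instance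

-- ===== CLAIM (what is proved, stated in full; the proofs are below) =====
def Claim_equal_anchor_graph_py : Prop := ∀ (records : List (String × List (String × List String))), Dom_anchor_graph_py records → Pre_anchor_graph_py records → Spec_anchor_graph_py records (anchor_graph_py records)

-- ===== LEMMAS AND PROOFS =====

-- the per-record contribution B appends to node d's candidate list
def pieceB (rd : PySem.Dict String (List (String × List String))) (d : String)
    (p : String × List (String × List String)) : List String :=
  let anchors := (PySem.Dict.ofList p.2).getD "anchors" []
  if p.1 == d then anchors.filter (fun t => rd.contains t)
  else if anchors.contains d then [p.1]
  else []

-- the per-target contribution of A's inner loop to node d's set, as a list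
def innerCand (rd : PySem.Dict String (List (String × List String))) (p1 d t : String) : List String :=
  if rd.contains t then (if p1 == d then [t] else if t == d then [p1] else []) else []

theorem fold_if_singleton_mem (d p1 : String) :
    ∀ (ts : List String) (s : PySem.Set String), p1 ∈ s →
      (ts.flatMap (fun t => if t == d then [p1] else [])).foldl PySem.Set.add s = s := by
  intro ts
  induction ts with
  | nil => intro s _; rfl
  | cons t ts ih =>
    intro s hmem
    simp only [List.flatMap_cons, List.foldl_append]
    by_cases htd : (t == d) = true
    · rw [if_pos htd]
      simp only [List.foldl_cons, List.foldl_nil, PySem.Set.add_of_mem hmem]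
      exact ih s hmem
    · rw [if_neg (by simp_all)]
      exact ih s hmem

theorem fold_if_singleton (d p1 : String) :
    ∀ (ts : List String) (s : PySem.Set String),
      (ts.flatMap (fun t => if t == d then [p1] else [])).foldl PySem.Set.add s
        = (if ts.contains d then [p1] else []).foldl PySem.Set.add s := by
  intro ts
  induction ts with
  | nil => intro s; rfl
  | cons t ts ih =>
    intro s
    simp only [List.flatMap_cons, List.foldl_append, List.contains_cons]
    by_cases htd : t = d
    · subst htd
      rw [if_pos (show (t == t) = true by simp),
        if_pos (show (t == t || ts.contains t) = true by simp)]
      simp only [List.foldl_cons, List.foldl_nil]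
      exact fold_if_singleton_mem t p1 ts _ (by simp [PySem.Set.mem_add])
    · rw [if_neg (by simpa using htd),
        show (d == t || ts.contains d) = ts.contains d by
          simp [show d ≠ t from fun h => htd h.symm]]
      exact ih s

theorem flatMap_if_singleton_filter (c : String → Bool) :
    ∀ ts : List String, ts.flatMap (fun t => if c t then [t] else []) = ts.filter c := by
  intro ts
  induction ts with
  | nil => rfl
  | cons t ts ih =>
    simp only [List.flatMap_cons, List.filter_cons]
    by_cases h : c t = true
    · rw [if_pos h, if_pos h, ih]; rfl
    · rw [if_neg (by simp_all), if_neg (by simp_all), ih]; rfl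

theorem innerCand_eq_of_eq (rd : PySem.Dict String (List (String × List String)))
    (p1 d : String) (hpd : (p1 == d) = true) :
    innerCand rd p1 d = fun t => if rd.contains t then [t] else [] := by
  funext t
  unfold innerCand
  rw [hpd]
  rfl

theorem innerCand_eq_of_ne (rd : PySem.Dict String (List (String × List String)))
    (p1 d : String) (hpd : (p1 == d) = false) (hd : rd.contains d = true) :
    innerCand rd p1 d = fun t => if t == d then [p1] else [] := by
  funext t
  unfold innerCand
  rw [hpd]
  by_cases htd : t = d
  · subst htd
    simp [hd]
  · simp [htd]

-- A's inner contributions fold to the same set as B's single piece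
theorem piece_fold_eq (rd : PySem.Dict String (List (String × List String)))
    (p1 d : String) (hd : rd.contains d = true) (ts : List String)
    (s : PySem.Set String) :
    (ts.flatMap (innerCand rd p1 d)).foldl PySem.Set.add s
      = (if p1 == d then ts.filter (fun t => rd.contains t)
         else if ts.contains d then [p1] else []).foldl PySem.Set.add s := by
  by_cases hpd : (p1 == d) = true
  · rw [if_pos hpd, innerCand_eq_of_eq rd p1 d hpd, flatMap_if_singleton_filter]
  · rw [if_neg (by simp_all), innerCand_eq_of_ne rd p1 d (by simp_all) hd,
      fold_if_singleton]

-- the effect of A's inner loop on slot d of the graph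
theorem inner_getD (rd : PySem.Dict String (List (String × List String)))
    (p1 d : String) (ts : List String) :
    ∀ (g : PySem.Dict String (PySem.Set String)),
      (ts.foldl (fun g t =>
          if rd.contains t then
            (g.modify p1 PySem.Set.empty (fun s => PySem.Set.add s t)).modify t
              PySem.Set.empty (fun s => PySem.Set.add s p1)
          else g) g).getD d PySem.Set.empty
        = (ts.flatMap (innerCand rd p1 d)).foldl PySem.Set.add (g.getD d PySem.Set.empty) := by
  induction ts with
  | nil => intro g; rfl
  | cons t ts ih =>
    intro g
    simp only [List.foldl_cons, List.flatMap_cons, List.foldl_append]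
    rw [ih]
    congr 1
    unfold innerCand
    by_cases hv : rd.contains t = true
    · simp only [if_pos hv, PySem.Dict.getD_modify, beq_iff_eq]
      clear ih
      split_ifs <;> first
        | (subst_vars; rfl)
        | (subst_vars; contradiction)
        | (subst_vars; rw [PySem.Set.add_of_mem (by simp [PySem.Set.mem_add])]; rfl)
    · simp [hv]

-- the effect of A's whole edge pass on slot d, against B's candidate list
theorem outer_getD (rd : PySem.Dict String (List (String × List String)))
    (d : String) (hd : rd.contains d = true)
    (items : List (String × List (String × List String))) :
    ∀ (g : PySem.Dict String (PySem.Set String)),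
      (items.foldl (fun g p =>
          ((PySem.Dict.ofList p.2).getD "anchors" []).foldl (fun g t =>
            if rd.contains t then
              (g.modify p.1 PySem.Set.empty (fun s => PySem.Set.add s t)).modify t
                PySem.Set.empty (fun s => PySem.Set.add s p.1)
            else g) g) g).getD d PySem.Set.empty
        = (items.flatMap (pieceB rd d)).foldl PySem.Set.add (g.getD d PySem.Set.empty) := by
  induction items with
  | nil => intro g; rfl
  | cons p items ih =>
    intro g
    simp only [List.foldl_cons, List.flatMap_cons, List.foldl_append]
    rw [ih, inner_getD, piece_fold_eq rd p.1 d hd]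
    rfl

-- keys are untouched by the edge pass (every modified key is already a key)
theorem keys_inner (rd : PySem.Dict String (List (String × List String)))
    (p1 : String) (hp1 : p1 ∈ rd.keys) (ts : List String) :
    ∀ (g : PySem.Dict String (PySem.Set String)), g.keys = rd.keys →
      (ts.foldl (fun g t =>
          if rd.contains t then
            (g.modify p1 PySem.Set.empty (fun s => PySem.Set.add s t)).modify t
              PySem.Set.empty (fun s => PySem.Set.add s p1)
          else g) g).keys = rd.keys := by
  induction ts with
  | nil => intro g hg; exact hg
  | cons t ts ih =>
    intro g hg
    simp only [List.foldl_cons]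
    apply ih
    by_cases hv : rd.contains t = true
    · have ht : t ∈ rd.keys := by
        rw [PySem.Dict.contains_eq_decide_mem_keys] at hv; simpa using hv
      rw [if_pos hv, PySem.Dict.keys_modify, PySem.Dict.keys_insert_of_contains,
        PySem.Dict.keys_modify, PySem.Dict.keys_insert_of_contains, hg]
      · rw [PySem.Dict.contains_eq_decide_mem_keys, hg]; simpa using hp1
      · rw [PySem.Dict.contains_eq_decide_mem_keys, PySem.Dict.keys_modify,
          PySem.Dict.keys_insert_of_contains, hg]
        · simpa using ht
        · rw [PySem.Dict.contains_eq_decide_mem_keys, hg]; simpa using hp1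
    · simpa [hv] using hg

theorem keys_outer (rd : PySem.Dict String (List (String × List String)))
    (items : List (String × List (String × List String)))
    (hitems : ∀ p ∈ items, p.1 ∈ rd.keys) :
    ∀ (g : PySem.Dict String (PySem.Set String)), g.keys = rd.keys →
      (items.foldl (fun g p =>
          ((PySem.Dict.ofList p.2).getD "anchors" []).foldl (fun g t =>
            if rd.contains t then
              (g.modify p.1 PySem.Set.empty (fun s => PySem.Set.add s t)).modify t
                PySem.Set.empty (fun s => PySem.Set.add s p.1)
            else g) g) g).keys = rd.keys := by
  induction items with
  | nil => intro g hg; exact hg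
  | cons p items ih =>
    intro g hg
    simp only [List.foldl_cons]
    exact ih (fun q hq => hitems q (List.mem_cons_of_mem _ hq)) _
      (keys_inner rd p.1 (hitems p (List.mem_cons_self)) _ g hg)

-- ===== VERDICT (by name: the statement is the Claim_ definition above) =====
theorem anchor_graph_py_spec : Claim_equal_anchor_graph_py := by
  intro records _ _
  unfold Spec_anchor_graph_py anchor_graph_py anchor_graph_py_alt
  set rd : PySem.Dict String (List (String × List String)) := PySem.Dict.ofList records with hrd
  have hnd : rd.keys.Nodup := PySem.Dict.nodup_keys_ofList records
  -- graph0: a dict with keys rd.keys, all values empty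
  have h0 : (rd.keys.foldl (fun g k => g.insert k PySem.Set.empty)
      (PySem.Dict.empty : PySem.Dict String (PySem.Set String))).items
      = rd.keys.map (fun k => (k, PySem.Set.empty)) := by
    have := PySem.Dict.items_foldl_insert_fresh rd.keys (fun a => a)
      (fun _ => (PySem.Set.empty : PySem.Set String)) PySem.Dict.empty
      (fun a _ => rfl) (by simpa using hnd)
    simpa using this
  have h0keys : (rd.keys.foldl (fun g k => g.insert k PySem.Set.empty)
      (PySem.Dict.empty : PySem.Dict String (PySem.Set String))).keys = rd.keys := by
    show (_ : PySem.Dict String (PySem.Set String)).items.map (fun p => p.1) = rd.keys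
    rw [h0]; simp [Function.comp_def]
  have h0nd : (rd.keys.foldl (fun g k => g.insert k PySem.Set.empty)
      (PySem.Dict.empty : PySem.Dict String (PySem.Set String))).keys.Nodup := by
    rw [h0keys]; exact hnd
  have h0getD : ∀ d ∈ rd.keys, (rd.keys.foldl (fun g k => g.insert k PySem.Set.empty)
      (PySem.Dict.empty : PySem.Dict String (PySem.Set String))).getD d PySem.Set.empty
      = PySem.Set.empty := by
    intro d hdm
    apply PySem.Dict.getD_of_mem_items _ _ h0nd
    rw [h0]
    exact List.mem_map_of_mem hdm
  have hkeys := keys_outer rd rd.items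
    (fun p hp => List.mem_map_of_mem hp) _ h0keys
  rw [PySem.Dict.items_eq_map_keys _ (by rw [hkeys]; exact hnd) PySem.Set.empty, hkeys]
  apply List.map_congr_left
  intro d hdm
  have hd : rd.contains d = true := by
    rw [PySem.Dict.contains_eq_decide_mem_keys]; simpa using hdm
  rw [outer_getD rd d hd rd.items, h0getD d hdm]
  unfold altNeighbours pieceB
  rw [PySem.Set.ofList_eq_foldl,
    show (fun (cand : List String) (p : String × List (String × List String)) =>
        let anchors := (PySem.Dict.ofList p.2).getD "anchors" []
        if p.1 == d then cand ++ anchors.filter (fun t => rd.contains t)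
        else if anchors.contains d then cand ++ [p.1]
        else cand)
      = (fun cand p => cand ++ pieceB rd d p) by
      funext cand p
      unfold pieceB
      simp only
      split
      · rfl
      · split <;> simp,
    PySem.List.foldl_append_eq_flatMap]
  rfl
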